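-- pv_equiv track=rewrite | github.com/stratzenblitz/bulk-checksum | bulk_checksum/compare.py | compare_checksums
-- ===== SOURCE A (Python) =====
-- def compare_checksums(source_checksum, destination_checksum):
--     only_in_source = {k: v for k, v in source_checksum.items() if k not in destination_checksum}
--     only_in_destination = {k: v for k, v in destination_checksum.items() if k not in source_checksum}
--     mismatches = {k: (f"{source_checksum[k]} -> {destination_checksum[k]}") for k in source_checksum if k in destination_checksum and source_checksum[k] != destination_checksum[k]}
--
--     return {
--         "only_in_source": only_in_source,
--         "only_in_destination": only_in_destination,
--         "mismatches": mismatches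
--     }
-- ===== SOURCE B (Python) =====
-- def compare_checksums(source_checksum, destination_checksum):
--     # Build one merged table key -> (source value or None, destination value or None),
--     # then classify each merged entry into the three result buckets in a single pass.
--     merged = {}
--     for k, v in source_checksum.items():
--         merged[k] = (v, None)
--     for k, v in destination_checksum.items():
--         entry = merged.get(k)
--         merged[k] = (entry[0] if entry is not None else None, v)
--     only_in_source = {}
--     only_in_destination = {}
--     mismatches = {}
--     for k, (s, d) in merged.items():
--         if d is None:
--             only_in_source[k] = s
--         elif s is None:
--             only_in_destination[k] = d
--         elif s != d:
--             mismatches[k] = f"{s} -> {d}"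
--     return {
--         "only_in_source": only_in_source,
--         "only_in_destination": only_in_destination,
--         "mismatches": mismatches
--     }
-- ===== Notes on version B (the rewrite author's own statement) =====
-- stated objective: alternative
-- what changed: Instead of three filtering comprehensions over the two dicts, B first builds one merged table key -> (source value or None, destination value or None) and then fills all three result buckets by classifying each merged entry in a single pass.
import Mathlib
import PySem

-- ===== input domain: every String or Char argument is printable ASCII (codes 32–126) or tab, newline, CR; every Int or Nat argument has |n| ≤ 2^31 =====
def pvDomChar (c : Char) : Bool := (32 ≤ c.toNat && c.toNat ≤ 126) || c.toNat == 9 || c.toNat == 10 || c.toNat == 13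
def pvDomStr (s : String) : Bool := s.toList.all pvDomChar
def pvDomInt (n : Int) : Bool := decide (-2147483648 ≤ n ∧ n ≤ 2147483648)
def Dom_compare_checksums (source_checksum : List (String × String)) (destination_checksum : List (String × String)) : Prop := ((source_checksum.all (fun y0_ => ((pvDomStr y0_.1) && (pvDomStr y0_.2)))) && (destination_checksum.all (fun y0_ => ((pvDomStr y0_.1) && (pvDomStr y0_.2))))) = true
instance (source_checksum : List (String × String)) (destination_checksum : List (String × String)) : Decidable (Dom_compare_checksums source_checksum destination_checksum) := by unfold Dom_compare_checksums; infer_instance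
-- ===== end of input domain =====

-- B builds one merged table key -> (source value?, destination value?) and classifies its
-- entries into the three buckets in a single pass, instead of A's three filtering
-- comprehensions over the two input dicts; same values and order, no speed claim.

-- ===== PORT A =====
-- A's three dict comprehensions, each a loop over the items/keys appending where the test holds.
-- `d[k]` is ported as `(d.get? k).getD ""`; the "" default is never taken where it is used,
-- because every such `k` is guarded by a `contains` test on the same dict.
def compare_checksums (source_checksum : List (String × String)) (destination_checksum : List (String × String)) : List (String × List (String × String)) :=
  let ds := PySem.Dict.mk source_checksum
  let dd := PySem.Dict.mk destination_checksum
  let only_in_source := source_checksum.foldl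
    (fun acc p => if !(dd.contains p.1) then acc ++ [p] else acc) []
  let only_in_destination := destination_checksum.foldl
    (fun acc p => if !(ds.contains p.1) then acc ++ [p] else acc) []
  let mismatches := (source_checksum.map (·.1)).foldl
    (fun acc k =>
      if dd.contains k && !(((ds.get? k).getD "") == ((dd.get? k).getD "")) then
        acc ++ [(k, ((ds.get? k).getD "") ++ " -> " ++ ((dd.get? k).getD ""))]
      else acc) []
  [("only_in_source", only_in_source),
   ("only_in_destination", only_in_destination),
   ("mismatches", mismatches)]

-- ===== PORT B =====
-- One loop inserts every source item as (some v, none); one loop over destination merges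
-- (keeping the source component via `merged.get(k)`); one loop over merged.items classifies.
-- `q.2.1.getD ""` ports Python's `only_in_source[k] = s`: the default is never taken, since
-- an entry with no destination component always has a source component.
def compare_checksums_alt (source_checksum : List (String × String)) (destination_checksum : List (String × String)) : List (String × List (String × String)) :=
  let merged0 := source_checksum.foldl
    (fun (m : PySem.Dict String (Option String × Option String)) p =>
      m.insert p.1 (some p.2, none)) PySem.Dict.empty
  let merged := destination_checksum.foldl
    (fun m p =>
      m.insert p.1 ((match m.get? p.1 with | some e => e.1 | none => none), some p.2)) merged0
  let t := merged.items.foldl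
    (fun (t : List (String × String) × List (String × String) × List (String × String)) q =>
      match q.2.2 with
      | none => (t.1 ++ [(q.1, q.2.1.getD "")], t.2.1, t.2.2)
      | some d =>
        match q.2.1 with
        | none => (t.1, t.2.1 ++ [(q.1, d)], t.2.2)
        | some s => if s ≠ d then (t.1, t.2.1, t.2.2 ++ [(q.1, s ++ " -> " ++ d)]) else t)
    ([], [], [])
  [("only_in_source", t.1),
   ("only_in_destination", t.2.1),
   ("mismatches", t.2.2)]

-- ===== PRECONDITION & SPEC =====
-- Pre_ excludes association lists whose keys repeat (in either argument): a Python dict cannot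
-- hold duplicate keys, so such lists have no canonical dict reading.
def Pre_compare_checksums (source_checksum : List (String × String)) (destination_checksum : List (String × String)) : Prop :=
  (source_checksum.map (·.1)).Nodup ∧ (destination_checksum.map (·.1)).Nodup
instance (source_checksum : List (String × String)) (destination_checksum : List (String × String)) : Decidable (Pre_compare_checksums source_checksum destination_checksum) := by unfold Pre_compare_checksums; infer_instance

def pvWitness_compare_checksums : (List (String × String)) × (List (String × String)) :=
  ([("a", "1"), ("b", "2")], [("b", "3"), ("c", "4")])

def Spec_compare_checksums (source_checksum : List (String × String)) (destination_checksum : List (String × String)) (out : List (String × List (String × String))) : Prop := out = compare_checksums_alt source_checksum destination_checksum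
instance (source_checksum : List (String × String)) (destination_checksum : List (String × String)) (out : List (String × List (String × String))) : Decidable (Spec_compare_checksums source_checksum destination_checksum out) := by unfold Spec_compare_checksums; infer_instance

-- ===== CLAIM (what is proved, stated in full; the proofs are below) =====
def Claim_equal_compare_checksums : Prop := ∀ (source_checksum : List (String × String)) (destination_checksum : List (String × String)), Dom_compare_checksums source_checksum destination_checksum → Pre_compare_checksums source_checksum destination_checksum → Spec_compare_checksums source_checksum destination_checksum (compare_checksums source_checksum destination_checksum)


-- ===== LEMMAS AND PROOFS =====

-- B's classification fold over the merged items splits into three independent folds,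
-- one per output bucket.
theorem pv_split3 (L : List (String × (Option String × Option String)))
    (a b c : List (String × String)) :
    L.foldl (fun (t : List (String × String) × List (String × String) × List (String × String)) q =>
      match q.2.2 with
      | none => (t.1 ++ [(q.1, q.2.1.getD "")], t.2.1, t.2.2)
      | some d => match q.2.1 with
        | none => (t.1, t.2.1 ++ [(q.1, d)], t.2.2)
        | some s => if s ≠ d then (t.1, t.2.1, t.2.2 ++ [(q.1, s ++ " -> " ++ d)]) else t) (a, b, c)
    = (L.foldl (fun a q => match q.2.2 with | none => a ++ [(q.1, q.2.1.getD "")] | some _ => a) a,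
       L.foldl (fun b q => match q.2 with | (none, some d) => b ++ [(q.1, d)] | _ => b) b,
       L.foldl (fun c q => match q.2 with | (some s, some d) => if s ≠ d then c ++ [(q.1, s ++ " -> " ++ d)] else c | _ => c) c) := by
  induction L generalizing a b c with
  | nil => rfl
  | cons q L ih =>
    obtain ⟨k, s?, d?⟩ := q
    cases d? with
    | none => cases s? <;> simpa using ih _ _ _
    | some d =>
      cases s? with
      | none => simpa using ih _ _ _
      | some s =>
        by_cases hsd : s = d <;> simp [hsd] <;> simpa using ih _ _ _

-- Effect of B's destination loop on the merged dict: existing items get their destination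
-- component filled in from (the dict reading of) dst; destination-only keys are appended.
theorem pv_merge_items (dst : List (String × String))
    (d : PySem.Dict String (Option String × Option String))
    (hd : d.keys.Nodup) (hdst : (dst.map (·.1)).Nodup) :
    (dst.foldl (fun m p =>
        m.insert p.1 ((match m.get? p.1 with | some e => e.1 | none => none), some p.2)) d).items
    = d.items.map (fun q => match (PySem.Dict.mk dst).get? q.1 with
        | none => q
        | some v => (q.1, (q.2.1, some v)))
      ++ (dst.filter (fun p => !(d.contains p.1))).map (fun p => (p.1, ((none : Option String), some p.2))) := by
  induction dst generalizing d with
  | nil =>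
    simp [PySem.Dict.get?]
  | cons p rest ih =>
    obtain ⟨k0, v0⟩ := p
    simp only [List.map_cons, List.nodup_cons] at hdst
    obtain ⟨hp, hrest⟩ := hdst
    have hmkrest : (PySem.Dict.mk rest).get? k0 = none := by
      rw [PySem.Dict.get?_eq_none_iff_not_mem_keys]
      simpa [PySem.Dict.keys] using hp
    simp only [List.foldl_cons]
    cases hc : d.contains k0 with
    | true =>
      obtain ⟨e, he⟩ : ∃ e, d.get? k0 = some e := by
        cases h : d.get? k0 with
        | none => rw [PySem.Dict.get?_eq_none_iff_contains] at h; rw [h] at hc; cases hc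
        | some e => exact ⟨e, rfl⟩
      rw [ih _ (PySem.Dict.nodup_keys_insert _ _ _ hd) hrest]
      rw [PySem.Dict.items_insert_of_contains _ _ hc, he]
      rw [List.map_map]
      congr 1
      · apply List.map_congr_left
        intro q hq
        by_cases hk : q.1 = k0
        · have hqe : q = (k0, e) := by
            have := PySem.Dict.get?_of_mem_items d (k := q.1) (v := q.2) (by simpa using hq) hd
            rw [hk] at this; rw [this] at he
            obtain ⟨k', v'⟩ := q; cases he; simp_all
          subst hqe
          simp [PySem.Dict.get?_mk_cons, hmkrest]
        · simp [Function.comp, hk, PySem.Dict.get?_mk_cons, Ne.symm hk, beq_iff_eq]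
      · rw [List.filter_cons_of_neg (by simp [hc])]
        apply congrArg
        apply List.filter_congr
        intro q hq
        have hqk : q.1 ≠ k0 := by
          intro h; exact hp (h ▸ List.mem_map_of_mem hq)
        simp [PySem.Dict.contains_insert, hqk]
    | false =>
      have hnone : d.get? k0 = none := by rw [PySem.Dict.get?_eq_none_iff_contains]; exact hc
      rw [ih _ (PySem.Dict.nodup_keys_insert _ _ _ hd) hrest]
      rw [PySem.Dict.items_insert_of_not_contains _ _ hc, hnone]
      rw [List.map_append]
      rw [List.filter_cons_of_pos (by simp [hc])]
      simp only [List.map_cons, List.map_nil]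
      rw [hmkrest, List.append_assoc]
      congr 1
      · apply List.map_congr_left
        intro q hq
        have hqk : k0 ≠ q.1 := by
          intro h
          have : q.1 ∈ d.keys := by simpa [PySem.Dict.keys] using List.mem_map_of_mem hq (f := (·.1))
          rw [← h] at this
          rw [(PySem.Dict.contains_iff_mem_keys d k0).2 this] at hc; cases hc
        simp [PySem.Dict.get?_mk_cons, hqk]
      · rw [List.singleton_append]
        congr 1
        apply congrArg
        apply List.filter_congr
        intro q hq
        have hqk : q.1 ≠ k0 := by
          intro h; exact hp (h ▸ List.mem_map_of_mem hq)
        simp [PySem.Dict.contains_insert, hqk]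

-- B's source loop builds exactly the source items tagged (some v, none).
theorem pv_merged0_items (src : List (String × String)) (hs : (src.map (·.1)).Nodup) :
    (src.foldl (fun (m : PySem.Dict String (Option String × Option String)) p =>
        m.insert p.1 (some p.2, none)) PySem.Dict.empty).items
    = src.map (fun p => (p.1, (some p.2, (none : Option String)))) := by
  have := PySem.Dict.items_foldl_insert_fresh src (fun p => p.1)
    (fun p => ((some p.2 : Option String), (none : Option String))) PySem.Dict.empty
    (fun a _ => by simp [PySem.Dict.contains_empty]) hs
  simpa using this

-- L2-elements (destination-only entries) never feed the only_in_source bucket.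
theorem pv_stepS_skip (L : List (String × String)) (a : List (String × String)) :
    (L.map (fun p => (p.1, ((none : Option String), some p.2)))).foldl
      (fun (a : List (String × String)) (q : String × (Option String × Option String)) =>
        match q.2.2 with | none => a ++ [(q.1, q.2.1.getD "")] | some _ => a) a = a := by
  rw [List.foldl_map]; exact List.foldl_fixed _

-- L1-elements (entries with a source component) never feed the only_in_destination bucket.
theorem pv_stepD_skip (dst : List (String × String)) (L : List (String × String))
    (b : List (String × String)) :
    (L.map (fun p => (p.1, ((some p.2 : Option String), (PySem.Dict.mk dst).get? p.1)))).foldl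
      (fun (b : List (String × String)) (q : String × (Option String × Option String)) =>
        match q.2 with | (none, some d) => b ++ [(q.1, d)] | _ => b) b = b := by
  rw [List.foldl_map]; exact List.foldl_fixed _

-- The destination-only entries land, in order, in the only_in_destination bucket.
theorem pv_stepD_collect (L : List (String × String)) (b : List (String × String)) :
    (L.map (fun p => (p.1, ((none : Option String), some p.2)))).foldl
      (fun (b : List (String × String)) (q : String × (Option String × Option String)) =>
        match q.2 with | (none, some d) => b ++ [(q.1, d)] | _ => b) b = b ++ L := by
  rw [List.foldl_map]; exact PySem.List.foldl_append_singleton L b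

-- L2-elements never feed the mismatches bucket.
theorem pv_stepM_skip (L : List (String × String)) (c : List (String × String)) :
    (L.map (fun p => (p.1, ((none : Option String), some p.2)))).foldl
      (fun (c : List (String × String)) (q : String × (Option String × Option String)) =>
        match q.2 with
        | (some s, some d) => if s ≠ d then c ++ [(q.1, s ++ " -> " ++ d)] else c
        | _ => c) c = c := by
  rw [List.foldl_map]; exact List.foldl_fixed _

-- ===== VERDICT (by name: the statement is the Claim_ definition above) =====
theorem compare_checksums_spec : Claim_equal_compare_checksums := by
  intro src dst _ hpre
  obtain ⟨hs, hd⟩ := hpre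
  unfold Spec_compare_checksums compare_checksums compare_checksums_alt
  simp only []
  have hm0 := pv_merged0_items src hs
  have hm0keys : (src.foldl (fun (m : PySem.Dict String (Option String × Option String)) p =>
      m.insert p.1 (some p.2, none)) PySem.Dict.empty).keys.Nodup := by
    simp only [PySem.Dict.keys, hm0, List.map_map]
    simpa using hs
  have hcont : ∀ k, (src.foldl (fun (m : PySem.Dict String (Option String × Option String)) p =>
      m.insert p.1 (some p.2, none)) PySem.Dict.empty).contains k
      = (PySem.Dict.mk src).contains k := by
    intro k
    simp only [PySem.Dict.contains, hm0, List.any_map]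
    rfl
  have hdskeys : (PySem.Dict.mk src).keys.Nodup := by
    simpa [PySem.Dict.keys] using hs
  rw [pv_merge_items dst _ hm0keys hd, hm0, List.map_map]
  have hmap : (src.map ((fun q => match (PySem.Dict.mk dst).get? q.1 with
        | none => q
        | some v => (q.1, (q.2.1, some v))) ∘ (fun p => (p.1, (some p.2, (none : Option String))))))
      = src.map (fun p => (p.1, ((some p.2 : Option String), (PySem.Dict.mk dst).get? p.1))) := by
    apply List.map_congr_left
    intro p _
    cases h : (PySem.Dict.mk dst).get? p.1 <;> simp [Function.comp, h]
  have hfil : dst.filter (fun p => !((src.foldl (fun (m : PySem.Dict String (Option String × Option String)) p =>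
        m.insert p.1 (some p.2, none)) PySem.Dict.empty).contains p.1))
      = dst.filter (fun p => !((PySem.Dict.mk src).contains p.1)) := by
    apply List.filter_congr
    intro q _
    rw [hcont]
  rw [hmap, hfil, List.foldl_append, pv_split3, pv_split3]
  dsimp only
  refine congrArg₂ _ (congrArg _ ?_) (congrArg₂ _ (congrArg _ ?_) (congrArg₂ _ (congrArg _ ?_) rfl))
  · -- only_in_source
    rw [pv_stepS_skip, List.foldl_map]
    apply PySem.List.foldl_congr_mem
    intro acc p _
    cases h : (PySem.Dict.mk dst).get? p.1 with
    | none =>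
      rw [PySem.Dict.get?_eq_none_iff_contains] at h
      simp [h]
    | some v =>
      have hc : (PySem.Dict.mk dst).contains p.1 = true := by
        rw [PySem.Dict.contains_eq_isSome_get?, h]; rfl
      simp [hc]
  · -- only_in_destination
    rw [PySem.List.foldl_append_if_eq_filter, List.nil_append, pv_stepD_skip,
      pv_stepD_collect, List.nil_append]
  · -- mismatches
    rw [pv_stepM_skip, List.foldl_map, List.foldl_map]
    apply PySem.List.foldl_congr_mem
    intro acc p hp
    have hsrc : (PySem.Dict.mk src).get? p.1 = some p.2 := by
      exact PySem.Dict.get?_of_mem_items _ (by simpa using hp) hdskeys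
    cases h : (PySem.Dict.mk dst).get? p.1 with
    | none =>
      rw [PySem.Dict.get?_eq_none_iff_contains] at h
      simp [h]
    | some v =>
      have hc : (PySem.Dict.mk dst).contains p.1 = true := by
        rw [PySem.Dict.contains_eq_isSome_get?, h]; rfl
      by_cases hv : p.2 = v <;> simp [hc, hsrc, hv]
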